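-- pv_equiv track=rewrite | github.com/MattLoftus/quantum-gravity | experiments/exp89.py | is_comparability_connected
-- ===== SOURCE A (Python) =====
-- def is_comparability_connected(rel, N):
--     """Check if comparability graph is connected."""
--     adj = [set() for _ in range(N)]
--     for i in range(N):
--         for j in range(i+1, N):
--             if rel[i][j] or rel[j][i]:
--                 adj[i].add(j)
--                 adj[j].add(i)
--     visited = set([0])
--     queue = [0]
--     while queue:
--         node = queue.pop(0)
--         for nb in adj[node]:
--             if nb not in visited:
--                 visited.add(nb)
--                 queue.append(nb)
--     return len(visited) == N
-- ===== SOURCE B (Python) =====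
-- def is_comparability_connected(rel, N):
--     """Check if comparability graph is connected."""
--     reach = [False] * N
--     reach[0] = True
--     changed = True
--     while changed:
--         changed = False
--         for i in range(N):
--             if reach[i]:
--                 for j in range(N):
--                     if not reach[j] and (rel[i][j] or rel[j][i]):
--                         reach[j] = True
--                         changed = True
--     return all(reach)
-- ===== Notes on version B (the rewrite author's own statement) =====
-- stated objective: alternative
-- what changed: Replaces A's explicit adjacency-set construction plus BFS with a visited set and FIFO queue by an in-place boolean reachability relaxation: a single reach[] bit-vector is swept over all (i,j) pairs until a sweep changes nothing, then all(reach) is returned; no adjacency structure or queue is built.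
-- outside the precondition, e.g. on is_comparability_connected([[1, 0, 1], [0, 0, 1]], 3): A returns True, B raises IndexError
import Mathlib
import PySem

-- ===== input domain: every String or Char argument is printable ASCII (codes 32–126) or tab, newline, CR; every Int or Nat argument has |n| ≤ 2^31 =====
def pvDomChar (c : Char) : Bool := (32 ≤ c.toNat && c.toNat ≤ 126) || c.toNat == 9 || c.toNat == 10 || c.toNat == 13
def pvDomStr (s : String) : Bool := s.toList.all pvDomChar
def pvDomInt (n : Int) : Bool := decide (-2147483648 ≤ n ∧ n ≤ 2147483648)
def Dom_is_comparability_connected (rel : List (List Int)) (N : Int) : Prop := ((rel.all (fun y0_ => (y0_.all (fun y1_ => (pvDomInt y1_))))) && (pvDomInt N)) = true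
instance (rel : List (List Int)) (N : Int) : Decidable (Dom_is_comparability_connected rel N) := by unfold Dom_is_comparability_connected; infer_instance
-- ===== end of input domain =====

-- B replaces A's adjacency-sets + BFS queue by an in-place boolean reachability relaxation
-- (repeat sweeps over all pairs until no bit changes), same result, no auxiliary graph structure.

-- ===== PORT A =====
def aEdge (rel : List (List Int)) (i j : Int) : Bool :=
  decide (PySem.List.pyGetD (PySem.List.pyGetD rel i []) j 0 ≠ 0) ||
  decide (PySem.List.pyGetD (PySem.List.pyGetD rel j []) i 0 ≠ 0)

def aBuild (rel : List (List Int)) (N : Int) : List (PySem.Set Int) :=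
  (PySem.List.pyRange 0 N 1).foldl (fun adj i =>
    (PySem.List.pyRange (i+1) N 1).foldl (fun adj j =>
      if aEdge rel i j then
        let adj1 := adj.set i.toNat (PySem.Set.add (PySem.List.pyGetD adj i PySem.Set.empty) j)
        adj1.set j.toNat (PySem.Set.add (PySem.List.pyGetD adj1 j PySem.Set.empty) i)
      else adj) adj)
    (List.replicate N.toNat PySem.Set.empty)

def aBFS (adj : List (PySem.Set Int)) : Nat → PySem.Set Int → List Int → PySem.Set Int
  | 0, visited, _ => visited
  | _+1, visited, [] => visited
  | fuel+1, visited, node :: queue =>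
    let vq := (PySem.List.pyGetD adj node PySem.Set.empty).foldl
      (fun (vq : PySem.Set Int × List Int) nb =>
        if PySem.Set.contains vq.1 nb then vq
        else (PySem.Set.add vq.1 nb, vq.2 ++ [nb])) (visited, queue)
    aBFS adj fuel vq.1 vq.2

def is_comparability_connected (rel : List (List Int)) (N : Int) : Bool :=
  let adj := aBuild rel N
  -- fuel 2*N is enough: each BFS step pops one node and every enqueue adds a fresh visited node < N
  let visited := aBFS adj (2 * N).toNat (PySem.Set.ofList [0]) [0]
  decide (PySem.Set.len visited = N)

-- ===== PORT B =====
def bEdge (rel : List (List Int)) (i j : Int) : Bool :=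
  decide (PySem.List.pyGetD (PySem.List.pyGetD rel i []) j 0 ≠ 0) ||
  decide (PySem.List.pyGetD (PySem.List.pyGetD rel j []) i 0 ≠ 0)

def bRound (rel : List (List Int)) (N : Int) (reach : List Bool) : List Bool × Bool :=
  (PySem.List.pyRange 0 N 1).foldl (fun s i =>
    if PySem.List.pyGetD s.1 i false then
      (PySem.List.pyRange 0 N 1).foldl (fun (t : List Bool × Bool) j =>
        if !PySem.List.pyGetD t.1 j false && bEdge rel i j then (t.1.set j.toNat true, true)
        else t) s
    else s) (reach, false)

def bLoop (rel : List (List Int)) (N : Int) : Nat → List Bool → List Bool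
  | 0, reach => reach
  | fuel+1, reach =>
    let rc := bRound rel N reach
    if rc.2 then bLoop rel N fuel rc.1 else rc.1

def is_comparability_connected_alt (rel : List (List Int)) (N : Int) : Bool :=
  let reach := (List.replicate N.toNat false).set 0 true
  -- fuel N+1 is enough: a sweep that changes something raises the number of true bits (≤ N)
  (bLoop rel N (N.toNat + 1) reach).all (fun b => b)

-- ===== PRECONDITION & SPEC =====
-- Pre_ requires the full N×N matrix (N ≥ 1, at least N rows, first N rows of length ≥ N).
-- It excludes inputs where A raises (N ≤ 0, missing entries) and also some ragged matrices on
-- which A happens to return because `or` short-circuits past a missing symmetric entry.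
def Pre_is_comparability_connected (rel : List (List Int)) (N : Int) : Prop :=
  1 ≤ N ∧ N ≤ (rel.length : Int) ∧ ∀ row ∈ rel.take N.toNat, N ≤ (row.length : Int)
instance (rel : List (List Int)) (N : Int) : Decidable (Pre_is_comparability_connected rel N) := by
  unfold Pre_is_comparability_connected; infer_instance

def pvWitness_is_comparability_connected : List (List Int) × Int := ([[0, 1], [1, 0]], 2)

def Spec_is_comparability_connected (rel : List (List Int)) (N : Int) (out : Bool) : Prop := out = is_comparability_connected_alt rel N
instance (rel : List (List Int)) (N : Int) (out : Bool) : Decidable (Spec_is_comparability_connected rel N out) := by unfold Spec_is_comparability_connected; infer_instance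

-- ===== CLAIM (what is proved, stated in full; the proofs are below) =====
def Claim_equal_is_comparability_connected : Prop := ∀ (rel : List (List Int)) (N : Int), Dom_is_comparability_connected rel N → Pre_is_comparability_connected rel N → Spec_is_comparability_connected rel N (is_comparability_connected rel N)

-- ===== LEMMAS AND PROOFS =====

-- the (symmetric) comparability edge relation restricted to [0, N)
def EdgeP (rel : List (List Int)) (N : Int) (a b : Int) : Prop :=
  0 ≤ a ∧ a < N ∧ 0 ≤ b ∧ b < N ∧ aEdge rel a b = true

def Reach (rel : List (List Int)) (N : Int) (x : Int) : Prop :=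
  Relation.ReflTransGen (EdgeP rel N) 0 x

lemma aEdge_symm (rel : List (List Int)) (a b : Int) : aEdge rel a b = aEdge rel b a := by
  simp [aEdge, Bool.or_comm]

lemma reach_range {rel : List (List Int)} {N x : Int} (h1 : 1 ≤ N)
    (h : Reach rel N x) : 0 ≤ x ∧ x < N := by
  induction h with
  | refl => omega
  | tail _ e _ => exact ⟨e.2.2.1, e.2.2.2.1⟩


lemma getD_set {α : Type} (l : List α) (k x : Int) (v d : α) (hk0 : 0 ≤ k)
    (hk : k < l.length) (hx : 0 ≤ x) :
    PySem.List.pyGetD (l.set k.toNat v) x d = if x = k then v else PySem.List.pyGetD l x d := by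
  rw [PySem.List.pyGetD_of_nonneg _ _ hx, PySem.List.pyGetD_of_nonneg _ _ hx,
    List.getD_eq_getElem?_getD, List.getD_eq_getElem?_getD, List.getElem?_set]
  by_cases hxe : x = k
  · subst hxe
    rw [if_pos rfl, if_pos (by omega : x.toNat < l.length), if_pos rfl]; rfl
  · rw [if_neg (by omega), if_neg hxe]

lemma foldl_length_inv {α β : Type} (f : List α → β → List α) (l : List β) (a : List α)
    (h : ∀ s x, (f s x).length = s.length) : (l.foldl f a).length = a.length := by
  induction l generalizing a with
  | nil => rfl
  | cons b l ih => rw [List.foldl_cons, ih, h]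

-- the inner-loop step of A's adjacency build, as a function
def aStep (rel : List (List Int)) (i : Int) (adj : List (PySem.Set Int)) (j : Int) :
    List (PySem.Set Int) :=
  if aEdge rel i j then
    let adj1 := adj.set i.toNat (PySem.Set.add (PySem.List.pyGetD adj i PySem.Set.empty) j)
    adj1.set j.toNat (PySem.Set.add (PySem.List.pyGetD adj1 j PySem.Set.empty) i)
  else adj

lemma aStep_length (rel : List (List Int)) (i : Int) (adj : List (PySem.Set Int)) (j : Int) :
    (aStep rel i adj j).length = adj.length := by
  unfold aStep; split <;> simp

lemma mem_aStep (rel : List (List Int)) (i j x y : Int) (adj : List (PySem.Set Int))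
    (hi0 : 0 ≤ i) (hi : i < adj.length) (hj0 : 0 ≤ j) (hj : j < adj.length) (hx : 0 ≤ x) :
    y ∈ PySem.List.pyGetD (aStep rel i adj j) x PySem.Set.empty ↔
      y ∈ PySem.List.pyGetD adj x PySem.Set.empty ∨
        (aEdge rel i j = true ∧ ((x = i ∧ y = j) ∨ (x = j ∧ y = i))) := by
  unfold aStep
  by_cases hedge : aEdge rel i j = true
  · simp only [if_pos hedge]
    rw [getD_set _ j x _ _ hj0 (by simpa using hj) hx]
    rw [getD_set _ i x _ _ hi0 hi hx]
    rw [getD_set _ i j _ _ hi0 hi hj0]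
    by_cases hxj : x = j <;> by_cases hxi : x = i <;> by_cases hji : j = i <;>
      simp_all [PySem.Set.mem_add]
  · simp [hedge]

lemma mem_innerfold (rel : List (List Int)) (N i x y : Int) (hi0 : 0 ≤ i) :
    ∀ fuel (m : Int), (N - m).toNat = fuel → ∀ adj : List (PySem.Set Int),
      adj.length = N.toNat → i < N → 0 ≤ m → 0 ≤ x →
      (y ∈ PySem.List.pyGetD ((PySem.List.pyRange m N).foldl (aStep rel i) adj) x PySem.Set.empty ↔
        y ∈ PySem.List.pyGetD adj x PySem.Set.empty ∨
          ∃ j, m ≤ j ∧ j < N ∧ aEdge rel i j = true ∧ ((x = i ∧ y = j) ∨ (x = j ∧ y = i))) := by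
  intro fuel
  induction fuel with
  | zero =>
    intro m hm adj hlen hiN hm0 hx
    rw [PySem.List.pyRange_one_eq_nil (by omega)]
    simp only [List.foldl_nil]
    constructor
    · exact fun h => Or.inl h
    · rintro (h | ⟨j, hj1, hj2, _⟩)
      · exact h
      · omega
  | succ fuel ih =>
    intro m hm adj hlen hiN hm0 hx
    by_cases hmN : m < N
    · rw [PySem.List.pyRange_one_cons hmN, List.foldl_cons]
      rw [ih (m + 1) (by omega) _ (by rw [aStep_length]; exact hlen) hiN (by omega) hx]
      rw [mem_aStep rel i m x y adj hi0 (by omega) hm0 (by omega) hx]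
      constructor
      · rintro ((h | ⟨he, hc⟩) | ⟨j, hj1, hj2, he, hc⟩)
        · exact Or.inl h
        · exact Or.inr ⟨m, le_refl m, hmN, he, hc⟩
        · exact Or.inr ⟨j, by omega, hj2, he, hc⟩
      · rintro (h | ⟨j, hj1, hj2, he, hc⟩)
        · exact Or.inl (Or.inl h)
        · by_cases hjm : j = m
          · subst hjm; exact Or.inl (Or.inr ⟨he, hc⟩)
          · exact Or.inr ⟨j, by omega, hj2, he, hc⟩
    · rw [PySem.List.pyRange_one_eq_nil (by omega)]
      simp only [List.foldl_nil]
      constructor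
      · exact fun h => Or.inl h
      · rintro (h | ⟨j, hj1, hj2, _⟩)
        · exact h
        · omega

lemma mem_outerfold (rel : List (List Int)) (N x y : Int) (hx : 0 ≤ x) :
    ∀ fuel (m : Int), (N - m).toNat = fuel → 0 ≤ m → ∀ adj : List (PySem.Set Int),
      adj.length = N.toNat →
      (y ∈ PySem.List.pyGetD ((PySem.List.pyRange m N).foldl
            (fun adj i => (PySem.List.pyRange (i+1) N).foldl (aStep rel i) adj) adj) x
            PySem.Set.empty ↔
        y ∈ PySem.List.pyGetD adj x PySem.Set.empty ∨
          ∃ i j, m ≤ i ∧ i < j ∧ j < N ∧ aEdge rel i j = true ∧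
            ((x = i ∧ y = j) ∨ (x = j ∧ y = i))) := by
  intro fuel
  induction fuel with
  | zero =>
    intro m hm hm0 adj hlen
    rw [PySem.List.pyRange_one_eq_nil (by omega)]
    simp only [List.foldl_nil]
    constructor
    · exact fun h => Or.inl h
    · rintro (h | ⟨i, j, hi1, hij, hj, _⟩)
      · exact h
      · omega
  | succ fuel ih =>
    intro m hm hm0 adj hlen
    by_cases hmN : m < N
    · rw [PySem.List.pyRange_one_cons hmN, List.foldl_cons]
      rw [ih (m + 1) (by omega) (by omega) _
        (by rw [foldl_length_inv _ _ _ (fun s x' => aStep_length rel m s x')]; exact hlen)]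
      rw [mem_innerfold rel N m x y hm0 (N - (m+1)).toNat (m+1) rfl adj hlen hmN (by omega) hx]
      constructor
      · rintro ((h | ⟨j, hj1, hj2, he, hc⟩) | ⟨i, j, hi1, hij, hj, he, hc⟩)
        · exact Or.inl h
        · exact Or.inr ⟨m, j, le_refl m, by omega, hj2, he, hc⟩
        · exact Or.inr ⟨i, j, by omega, hij, hj, he, hc⟩
      · rintro (h | ⟨i, j, hi1, hij, hj, he, hc⟩)
        · exact Or.inl (Or.inl h)
        · by_cases him : i = m
          · subst him; exact Or.inl (Or.inr ⟨j, by omega, hj, he, hc⟩)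
          · exact Or.inr ⟨i, j, by omega, hij, hj, he, hc⟩
    · rw [PySem.List.pyRange_one_eq_nil (by omega)]
      simp only [List.foldl_nil]
      constructor
      · exact fun h => Or.inl h
      · rintro (h | ⟨i, j, hi1, hij, hj, _⟩)
        · exact h
        · omega

lemma mem_aBuild {rel : List (List Int)} {N : Int} (x y : Int) (hx : 0 ≤ x) :
    y ∈ PySem.List.pyGetD (aBuild rel N) x PySem.Set.empty ↔
      (x ≠ y ∧ EdgeP rel N x y) := by
  have hbase : PySem.List.pyGetD (List.replicate N.toNat (PySem.Set.empty : PySem.Set Int)) x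
      PySem.Set.empty = PySem.Set.empty := by
    rw [PySem.List.pyGetD_of_nonneg _ _ hx, List.getD_eq_getElem?_getD]
    rcases h : (List.replicate N.toNat (PySem.Set.empty : PySem.Set Int))[x.toNat]? with _ | s
    · rfl
    · have hm := List.mem_of_getElem? h
      simp only [List.mem_replicate] at hm
      rw [hm.2]; rfl
  have hfold : aBuild rel N = (PySem.List.pyRange 0 N).foldl
      (fun adj i => (PySem.List.pyRange (i+1) N).foldl (aStep rel i) adj)
      (List.replicate N.toNat PySem.Set.empty) := rfl
  rw [hfold, mem_outerfold rel N x y hx N.toNat 0 (by omega) (by omega) _ (by simp), hbase]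
  constructor
  · rintro (h | ⟨i, j, hi1, hij, hj, he, hc⟩)
    · simp [PySem.Set.empty] at h
    · rcases hc with ⟨hxi, hyj⟩ | ⟨hxj, hyi⟩
      · subst hxi; subst hyj
        exact ⟨by omega, hi1, by omega, by omega, hj, he⟩
      · subst hxj; subst hyi
        refine ⟨by omega, by omega, hj, hi1, by omega, ?_⟩
        rw [aEdge_symm]; exact he
  · rintro ⟨hxy, hx0, hxN, hy0, hyN, he⟩
    refine Or.inr ?_
    rcases lt_or_gt_of_ne hxy with hlt | hgt
    · exact ⟨x, y, hx0, hlt, hyN, he, Or.inl ⟨rfl, rfl⟩⟩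
    · exact ⟨y, x, hy0, hgt, hxN, by rw [aEdge_symm]; exact he, Or.inr ⟨rfl, rfl⟩⟩

lemma nodup_length_le_of_subset (l m : List Int) (h : l.Nodup) (hs : l ⊆ m) :
    l.length ≤ m.length :=
  calc l.length = l.toFinset.card := (List.toFinset_card_of_nodup h).symm
  _ ≤ m.toFinset.card := Finset.card_le_card (fun x hx => by
      simp only [List.mem_toFinset] at *; exact hs hx)
  _ ≤ m.length := m.toFinset_card_le

lemma nodup_range_length_le (l : List Int) (N : Int) (hnd : l.Nodup)
    (h : ∀ x ∈ l, 0 ≤ x ∧ x < N) : l.length ≤ N.toNat := by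
  calc l.length = l.toFinset.card := (List.toFinset_card_of_nodup hnd).symm
  _ ≤ (Finset.Ico (0:Int) N).card := Finset.card_le_card (fun x hx => by
      simp only [List.mem_toFinset] at hx
      simp only [Finset.mem_Ico]
      exact (h x hx))
  _ = N.toNat := by rw [Int.card_Ico]; congr 1; omega

-- one BFS queue step: fold of the neighbour set into (visited, queue)
def bfsStep (vq : PySem.Set Int × List Int) (nb : Int) : PySem.Set Int × List Int :=
  if PySem.Set.contains vq.1 nb then vq
  else (PySem.Set.add vq.1 nb, vq.2 ++ [nb])

lemma bfs_fold (s : List Int) :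
    ∀ (v : PySem.Set Int) (q : List Int), v.Nodup →
      ((s.foldl bfsStep (v, q)).1.Nodup ∧
       (∀ x, x ∈ (s.foldl bfsStep (v, q)).1 ↔ x ∈ v ∨ x ∈ s) ∧
       (∀ z ∈ (s.foldl bfsStep (v, q)).2, z ∈ q ∨ (z ∈ (s.foldl bfsStep (v, q)).1 ∧ z ∉ v)) ∧
       (∀ z ∈ q, z ∈ (s.foldl bfsStep (v, q)).2) ∧
       ((s.foldl bfsStep (v, q)).1.length + q.length
          = v.length + (s.foldl bfsStep (v, q)).2.length) ∧
       (∀ x ∈ (s.foldl bfsStep (v, q)).1, x ∉ v → x ∈ (s.foldl bfsStep (v, q)).2)) := by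
  induction s with
  | nil =>
    intro v q hnd
    refine ⟨hnd, fun x => by simp, fun z hz => Or.inl hz, fun z hz => hz, by simp, ?_⟩
    intro x hx hxv; exact absurd hx hxv
  | cons a s ih =>
    intro v q hnd
    rw [List.foldl_cons]
    by_cases hmem : a ∈ v
    · have hstep : bfsStep (v, q) a = (v, q) := by
        unfold bfsStep
        rw [if_pos (by rw [PySem.Set.contains_iff]; exact hmem)]
      rw [hstep]
      obtain ⟨c1, c2, c3, c4, c5, c6⟩ := ih v q hnd
      refine ⟨c1, fun x => ?_, c3, c4, c5, c6⟩
      rw [c2]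
      constructor
      · rintro (h | h)
        · exact Or.inl h
        · exact Or.inr (List.mem_cons_of_mem a h)
      · rintro (h | h)
        · exact Or.inl h
        · rcases List.mem_cons.mp h with rfl | h
          · exact Or.inl hmem
          · exact Or.inr h
    · have hstep : bfsStep (v, q) a = (v ++ [a], q ++ [a]) := by
        unfold bfsStep
        rw [if_neg (by rw [PySem.Set.contains_iff]; exact hmem), PySem.Set.add_of_not_mem hmem]
      rw [hstep]
      have hnd' : (v ++ [a]).Nodup := by
        rw [← PySem.Set.add_of_not_mem hmem]; exact PySem.Set.nodup_add v a hnd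
      obtain ⟨c1, c2, c3, c4, c5, c6⟩ := ih (v ++ [a]) (q ++ [a]) hnd'
      refine ⟨c1, fun x => ?_, fun z hz => ?_, fun z hz => c4 z (by simp [hz]), by
        simp only [List.length_append, List.length_cons, List.length_nil] at c5 ⊢; omega,
        fun x hx hxv => ?_⟩
      · rw [c2]; simp; tauto
      · rcases c3 z hz with hq | ⟨hz1, hz2⟩
        · rcases List.mem_append.mp hq with h | h
          · exact Or.inl h
          · simp only [List.mem_singleton] at h
            subst h
            refine Or.inr ⟨(c2 z).mpr (Or.inl (by simp)), hmem⟩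
        · refine Or.inr ⟨hz1, fun hzv => hz2 (by simp [hzv])⟩
      · by_cases hxa : x = a
        · subst hxa; exact c4 x (by simp)
        · exact c6 x hx (by simp [hxa, hxv])

-- the BFS loop invariant
def BFSInv (rel : List (List Int)) (N : Int) (v : PySem.Set Int) (q : List Int) : Prop :=
  v.Nodup ∧ (0:Int) ∈ v ∧ (∀ z ∈ q, z ∈ v) ∧ (∀ x ∈ v, Reach rel N x) ∧
    (∀ x ∈ v, x ∉ q →
      ∀ y, y ∈ PySem.List.pyGetD (aBuild rel N) x PySem.Set.empty → y ∈ v)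

lemma aBFS_spec (rel : List (List Int)) (N : Int) (h1 : 1 ≤ N) :
    ∀ fuel (v : PySem.Set Int) (q : List Int), BFSInv rel N v q →
      2 * (N.toNat - v.length) + q.length ≤ fuel →
      ((aBFS (aBuild rel N) fuel v q).Nodup ∧
       (∀ x ∈ aBFS (aBuild rel N) fuel v q, Reach rel N x) ∧
       (0:Int) ∈ aBFS (aBuild rel N) fuel v q ∧
       (∀ x ∈ aBFS (aBuild rel N) fuel v q,
         ∀ y, y ∈ PySem.List.pyGetD (aBuild rel N) x PySem.Set.empty →
           y ∈ aBFS (aBuild rel N) fuel v q)) := by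
  intro fuel
  induction fuel with
  | zero =>
    intro v q hinv hm
    obtain ⟨i1, i2, i3, i4, i5⟩ := hinv
    have hq : q = [] := List.eq_nil_iff_length_eq_zero.mpr (by omega)
    subst hq
    exact ⟨i1, i4, i2, fun x hx y hy => i5 x hx (by simp) y hy⟩
  | succ fuel ih =>
    intro v q hinv hm
    obtain ⟨i1, i2, i3, i4, i5⟩ := hinv
    match q with
    | [] =>
      exact ⟨i1, i4, i2, fun x hx y hy => i5 x hx (by simp) y hy⟩
    | node :: qq =>
      have hnode_v : node ∈ v := i3 node (by simp)
      have hnode_reach := i4 node hnode_v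
      have hnode_rg := reach_range h1 hnode_reach
      set s := PySem.List.pyGetD (aBuild rel N) node PySem.Set.empty with hs
      obtain ⟨c1, c2, c3, c4, c5, c6⟩ := bfs_fold s v qq i1
      set r := s.foldl bfsStep (v, qq) with hr
      have hstep : aBFS (aBuild rel N) (fuel+1) v (node :: qq)
          = aBFS (aBuild rel N) fuel r.1 r.2 := rfl
      rw [hstep]
      have hsub : ∀ x ∈ r.1, Reach rel N x := by
        intro x hx
        rcases (c2 x).mp hx with hxv | hxs
        · exact i4 x hxv
        · have := (mem_aBuild node x hnode_rg.1).mp hxs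
          exact Relation.ReflTransGen.tail hnode_reach this.2
      have hvsub : ∀ x ∈ v, x ∈ r.1 := fun x hx => (c2 x).mpr (Or.inl hx)
      refine ih r.1 r.2 ⟨c1, hvsub 0 i2, ?_, hsub, ?_⟩ ?_
      · intro z hz
        rcases c3 z hz with hq | ⟨hz1, _⟩
        · exact hvsub z (i3 z (by simp [hq]))
        · exact hz1
      · intro x hx hxq y hy
        by_cases hxv : x ∈ v
        · by_cases hxn : x = node
          · subst hxn
            exact (c2 y).mpr (Or.inr hy)
          · have hxqq : x ∉ qq := fun h => hxq (c4 x h)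
            exact hvsub y (i5 x hxv (by simp [hxn, hxqq]) y hy)
        · exact absurd (c6 x hx hxv) hxq
      · have hr1len : r.1.length ≤ N.toNat :=
          nodup_range_length_le r.1 N c1 (fun x hx => reach_range h1 (hsub x hx))
        have hvlen : v.length ≤ r.1.length :=
          nodup_length_le_of_subset v r.1 i1 hvsub
        simp only [List.length_cons] at hm
        omega

lemma reach_mem_of_closed {rel : List (List Int)} {N : Int} (R : List Int)
    (h0 : (0:Int) ∈ R)
    (hcl : ∀ x ∈ R, ∀ y, y ∈ PySem.List.pyGetD (aBuild rel N) x PySem.Set.empty → y ∈ R) :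
    ∀ x, Reach rel N x → x ∈ R := by
  intro x hx
  induction hx with
  | refl => exact h0
  | @tail b c hbc e ih =>
    by_cases hbceq : b = c
    · subst hbceq; exact ih
    · exact hcl b ih c ((mem_aBuild b c e.1).mpr ⟨hbceq, e⟩)

lemma A_iff (rel : List (List Int)) (N : Int)
    (hpre : Pre_is_comparability_connected rel N) :
    is_comparability_connected rel N = true ↔
      ∀ x : Int, 0 ≤ x → x < N → Reach rel N x := by
  obtain ⟨h1, -, -⟩ := hpre
  have hof : PySem.Set.ofList [(0:Int)] = [0] := by decide
  have hinv : BFSInv rel N (PySem.Set.ofList [0]) [0] := by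
    rw [hof]
    refine ⟨List.nodup_singleton 0, by simp, fun z hz => hz, ?_, ?_⟩
    · intro x hx
      simp only [List.mem_singleton] at hx
      subst hx
      exact Relation.ReflTransGen.refl
    · intro x hx hxq
      simp only [List.mem_singleton] at hx
      exact absurd (by simp [hx]) hxq
  have hmeas : 2 * (N.toNat - (PySem.Set.ofList [(0:Int)]).length) + [(0:Int)].length
      ≤ (2 * N).toNat := by
    rw [hof]; simp only [List.length_singleton]; omega
  obtain ⟨hnd, hsound, h0, hcl⟩ :=
    aBFS_spec rel N h1 (2 * N).toNat (PySem.Set.ofList [0]) [0] hinv hmeas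
  have hcomp := reach_mem_of_closed (aBFS (aBuild rel N) (2 * N).toNat
    (PySem.Set.ofList [0]) [0]) h0 hcl
  set R := aBFS (aBuild rel N) (2 * N).toNat (PySem.Set.ofList [0]) [0] with hR
  show decide (PySem.Set.len R = N) = true ↔ _
  rw [decide_eq_true_iff]
  unfold PySem.Set.len
  constructor
  · intro hlen x hx0 hxN
    have hsubF : R.toFinset ⊆ Finset.Ico 0 N := by
      intro z hz
      rw [List.mem_toFinset] at hz
      rw [Finset.mem_Ico]
      exact reach_range h1 (hsound z hz)
    have heq : R.toFinset = Finset.Ico 0 N := by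
      apply Finset.eq_of_subset_of_card_le hsubF
      rw [Int.card_Ico, List.toFinset_card_of_nodup hnd]
      omega
    have hxR : x ∈ R := by
      rw [← List.mem_toFinset, heq, Finset.mem_Ico]
      exact ⟨hx0, hxN⟩
    exact hsound x hxR
  · intro hall
    have hsubF : Finset.Ico 0 N ⊆ R.toFinset := by
      intro z hz
      rw [Finset.mem_Ico] at hz
      rw [List.mem_toFinset]
      exact hcomp z (hall z hz.1 hz.2)
    have hge : N.toNat ≤ R.length := by
      have := Finset.card_le_card hsubF
      rw [Int.card_Ico, List.toFinset_card_of_nodup hnd] at this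
      omega
    have hle : R.length ≤ N.toNat :=
      nodup_range_length_le R N hnd (fun x hx => reach_range h1 (hsound x hx))
    omega

-- ===== B side =====

lemma pyGetD_true_iff (r : List Bool) (k : Int) (hk : 0 ≤ k) :
    (PySem.List.pyGetD r k false = true) ↔ r[k.toNat]? = some true := by
  rw [PySem.List.pyGetD_of_nonneg _ _ hk, List.getD_eq_getElem?_getD]
  rcases h : r[k.toNat]? with _ | b
  · simp
  · cases b <;> simp

lemma count_set_true (l : List Bool) (i : Nat) (hf : l[i]? = some false) :
    (l.set i true).count true = l.count true + 1 := by
  have h : i < l.length := by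
    by_contra hc
    rw [List.getElem?_eq_none (by omega)] at hf
    simp at hf
  have hset : l.set i true = l.take i ++ true :: l.drop (i+1) := by
    rw [List.set_eq_take_append_cons_drop, if_pos h]
  have hl : l.take i ++ l[i] :: l.drop (i+1) = l := by
    rw [List.getElem_cons_drop h]; exact List.take_append_drop i l
  have hgi : l[i] = false := by
    have h2 := List.getElem?_eq_getElem h
    rw [hf] at h2
    exact (Option.some.injEq ..).mp h2.symm
  conv_rhs => rw [← hl]
  rw [hset, List.count_append, List.count_append, List.count_cons, List.count_cons, hgi]
  simp
  omega

-- positions proved reachable so far are really reachable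
def GoodB (rel : List (List Int)) (N : Int) (r : List Bool) : Prop :=
  ∀ k : Nat, r[k]? = some true → Reach rel N (k : Int)

-- "the sweep only turns bits on": pointwise order on reach vectors
def PLe (r r' : List Bool) : Prop :=
  r'.length = r.length ∧ ∀ k : Nat, r[k]? = some true → r'[k]? = some true

lemma PLe_refl (r : List Bool) : PLe r r := ⟨rfl, fun _ h => h⟩

lemma PLe_trans {a b c : List Bool} (h1 : PLe a b) (h2 : PLe b c) : PLe a c :=
  ⟨h2.1.trans h1.1, fun k hk => h2.2 k (h1.2 k hk)⟩

-- the j-loop body and the i-loop body of B's sweep, as functions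
def bStepJ (rel : List (List Int)) (i : Int) (t : List Bool × Bool) (j : Int) :
    List Bool × Bool :=
  if !PySem.List.pyGetD t.1 j false && bEdge rel i j then (t.1.set j.toNat true, true) else t

def bStepI (rel : List (List Int)) (N : Int) (s : List Bool × Bool) (i : Int) :
    List Bool × Bool :=
  if PySem.List.pyGetD s.1 i false then (PySem.List.pyRange 0 N).foldl (bStepJ rel i) s else s

lemma bRound_eq (rel : List (List Int)) (N : Int) (reach : List Bool) :
    bRound rel N reach = (PySem.List.pyRange 0 N).foldl (bStepI rel N) (reach, false) := rfl

-- the relative state-transition property of any piece of the sweep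
def MRel (base u : List Bool × Bool) : Prop :=
  PLe base.1 u.1 ∧ (u.2 = false → u = base) ∧
    base.1.count true ≤ u.1.count true ∧
    (u.2 = true → base.2 = true ∨ base.1.count true < u.1.count true)

lemma MRel_refl (u : List Bool × Bool) : MRel u u :=
  ⟨PLe_refl u.1, fun _ => rfl, le_refl _, fun h => Or.inl h⟩

lemma MRel_trans {a b c : List Bool × Bool} (h1 : MRel a b) (h2 : MRel b c) : MRel a c := by
  obtain ⟨p1, f1, c1, g1⟩ := h1
  obtain ⟨p2, f2, c2, g2⟩ := h2
  refine ⟨PLe_trans p1 p2, ?_, le_trans c1 c2, ?_⟩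
  · intro hc
    have hcb : c = b := f2 hc
    rw [hcb]
    exact f1 (by rw [← hcb]; exact hc)
  · intro hc
    rcases g2 hc with hb | hlt
    · rcases g1 hb with h | h
      · exact Or.inl h
      · exact Or.inr (lt_of_lt_of_le h c2)
    · exact Or.inr (lt_of_le_of_lt c1 hlt)

lemma bStepJ_MRel (rel : List (List Int)) (i j : Int) (t : List Bool × Bool)
    (hj : 0 ≤ j) (hjl : j.toNat < t.1.length) :
    MRel t (bStepJ rel i t j) := by
  unfold bStepJ
  split
  · next hguard =>
    simp only [Bool.and_eq_true, Bool.not_eq_true'] at hguard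
    have hf : t.1[j.toNat]? = some false := by
      have hg := hguard.1
      rw [PySem.List.pyGetD_of_nonneg _ _ hj, List.getD_eq_getElem?_getD] at hg
      rcases h : t.1[j.toNat]? with _ | b
      · exact absurd h (by rw [List.getElem?_eq_getElem hjl]; simp)
      · rw [h] at hg; simp at hg; rw [hg]
    refine ⟨⟨by simp, fun k hk => ?_⟩, fun h => by simp at h, ?_, fun _ => Or.inr ?_⟩
    · rw [List.getElem?_set]
      by_cases he : j.toNat = k
      · subst he
        rw [if_pos rfl, if_pos hjl]
      · rw [if_neg he]
        exact hk
    · rw [count_set_true t.1 j.toNat hf]; omega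
    · rw [count_set_true t.1 j.toNat hf]; omega
  · exact MRel_refl t

lemma bEdge_eq_aEdge (rel : List (List Int)) (i j : Int) : bEdge rel i j = aEdge rel i j := rfl

lemma foldJ_MRel (rel : List (List Int)) (N i : Int)
    (l : List Int) (hl : ∀ x ∈ l, 0 ≤ x ∧ x < N) (t : List Bool × Bool)
    (hlen : t.1.length = N.toNat) :
    MRel t (l.foldl (bStepJ rel i) t) := by
  refine List.foldlRecOn (motive := fun u => MRel t u) l (bStepJ rel i) (MRel_refl t) ?_
  intro u hm j hj
  have hj' := hl j hj
  exact MRel_trans hm (bStepJ_MRel rel i j u hj'.1 (by rw [hm.1.1, hlen]; omega))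

lemma foldJ_props (rel : List (List Int)) (N i : Int) (hi0 : 0 ≤ i) (hiN : i < N)
    (l : List Int) (hl : ∀ x ∈ l, 0 ≤ x ∧ x < N) (t : List Bool × Bool)
    (hlen : t.1.length = N.toNat)
    (hReach : GoodB rel N t.1 → Reach rel N i) :
    MRel t (l.foldl (bStepJ rel i) t) ∧
      (GoodB rel N t.1 → GoodB rel N (l.foldl (bStepJ rel i) t).1) := by
  refine List.foldlRecOn (motive := fun u => MRel t u ∧ (GoodB rel N t.1 → GoodB rel N u.1))
    l (bStepJ rel i) ⟨MRel_refl t, fun h => h⟩ ?_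
  rintro u ⟨hm, hg⟩ j hj
  have hj' := hl j hj
  have hulen : u.1.length = N.toNat := by rw [hm.1.1, hlen]
  have hjl : j.toNat < u.1.length := by omega
  refine ⟨MRel_trans hm (bStepJ_MRel rel i j u hj'.1 hjl), ?_⟩
  intro hgood
  have hgu := hg hgood
  unfold bStepJ
  split
  · next hguard =>
    simp only [Bool.and_eq_true, Bool.not_eq_true'] at hguard
    intro k hk
    rw [List.getElem?_set] at hk
    by_cases he : j.toNat = k
    · have hkj : (k : Int) = j := by omega
      rw [hkj]
      refine Relation.ReflTransGen.tail (hReach hgood) ?_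
      refine ⟨hi0, hiN, hj'.1, hj'.2, ?_⟩
      rw [← bEdge_eq_aEdge]
      exact hguard.2
    · rw [if_neg he] at hk
      exact hgu k hk
  · exact hgu

lemma foldI_props (rel : List (List Int)) (N : Int)
    (l : List Int) (hl : ∀ x ∈ l, 0 ≤ x ∧ x < N) (s : List Bool × Bool)
    (hlen : s.1.length = N.toNat) :
    MRel s (l.foldl (bStepI rel N) s) ∧
      (GoodB rel N s.1 → GoodB rel N (l.foldl (bStepI rel N) s).1) := by
  refine List.foldlRecOn (motive := fun u => MRel s u ∧ (GoodB rel N s.1 → GoodB rel N u.1))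
    l (bStepI rel N) ⟨MRel_refl s, fun h => h⟩ ?_
  rintro u ⟨hm, hg⟩ i hi
  have hi' := hl i hi
  have hulen : u.1.length = N.toNat := by rw [hm.1.1, hlen]
  unfold bStepI
  split
  · next hguard =>
    have hui : u.1[i.toNat]? = some true := (pyGetD_true_iff u.1 i hi'.1).mp hguard
    have hReach : GoodB rel N u.1 → Reach rel N i := by
      intro hgood
      have := hgood i.toNat hui
      rwa [Int.toNat_of_nonneg hi'.1] at this
    obtain ⟨hm2, hg2⟩ := foldJ_props rel N i hi'.1 hi'.2
      (PySem.List.pyRange 0 N) (fun x hx => by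
        rw [PySem.List.mem_pyRange_one] at hx; exact hx) u hulen hReach
    exact ⟨MRel_trans hm hm2, fun hgood => hg2 (hg hgood)⟩
  · exact ⟨hm, hg⟩

lemma bRound_props (rel : List (List Int)) (N : Int) (r : List Bool)
    (hlen : r.length = N.toNat) :
    MRel (r, false) (bRound rel N r) ∧
      (GoodB rel N r → GoodB rel N (bRound rel N r).1) := by
  rw [bRound_eq]
  exact foldI_props rel N (PySem.List.pyRange 0 N)
    (fun x hx => by rw [PySem.List.mem_pyRange_one] at hx; exact hx) (r, false) hlen

lemma bRound_progress (rel : List (List Int)) (N : Int) (r : List Bool)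
    (hlen : r.length = N.toNat) (i j : Int)
    (hi0 : 0 ≤ i) (hiN : i < N) (hj0 : 0 ≤ j) (hjN : j < N)
    (hri : r[i.toNat]? = some true) (he : bEdge rel i j = true) :
    (bRound rel N r).1[j.toNat]? = some true := by
  rw [bRound_eq,
    PySem.List.pyRange_one_append 0 i N hi0 (by omega),
    PySem.List.pyRange_one_cons hiN,
    List.foldl_append, List.foldl_cons]
  obtain ⟨hmPre, -⟩ := foldI_props rel N (PySem.List.pyRange 0 i)
    (fun x hx => by rw [PySem.List.mem_pyRange_one] at hx; omega) (r, false) hlen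
  set s := (PySem.List.pyRange 0 i).foldl (bStepI rel N) (r, false) with hs
  have hslen : s.1.length = N.toNat := by rw [hmPre.1.1, hlen]
  have hsi : s.1[i.toNat]? = some true := hmPre.1.2 i.toNat hri
  have hstep : bStepI rel N s i = (PySem.List.pyRange 0 N).foldl (bStepJ rel i) s := by
    unfold bStepI
    rw [if_pos ((pyGetD_true_iff s.1 i hi0).mpr hsi)]
  rw [hstep,
    PySem.List.pyRange_one_append 0 j N hj0 (by omega),
    PySem.List.pyRange_one_cons hjN,
    List.foldl_append, List.foldl_cons]
  have hmJ := foldJ_MRel rel N i (PySem.List.pyRange 0 j)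
    (fun x hx => by rw [PySem.List.mem_pyRange_one] at hx; omega) s hslen
  set t := (PySem.List.pyRange 0 j).foldl (bStepJ rel i) s with ht
  have htlen : t.1.length = N.toNat := by rw [hmJ.1.1, hslen]
  have hafter : (bStepJ rel i t j).1[j.toNat]? = some true := by
    unfold bStepJ
    split
    · exact List.getElem?_set_self (by omega)
    · next hguard =>
      simp only [Bool.and_eq_true, Bool.not_eq_true', not_and] at hguard
      have hg : PySem.List.pyGetD t.1 j false = true := by
        by_contra hc
        exact absurd he (by simpa [Bool.not_eq_true] using hguard (by
          cases h : PySem.List.pyGetD t.1 j false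
          · rfl
          · exact absurd h hc))
      exact (pyGetD_true_iff t.1 j hj0).mp hg
  have hsteplen : (bStepJ rel i t j).1.length = N.toNat := by
    rw [(bStepJ_MRel rel i j t hj0 (by omega)).1.1, htlen]
  have hmJ2 := foldJ_MRel rel N i (PySem.List.pyRange (j+1) N)
    (fun x hx => by rw [PySem.List.mem_pyRange_one] at hx; omega) (bStepJ rel i t j) hsteplen
  have hinner : ((PySem.List.pyRange (j+1) N).foldl (bStepJ rel i)
      (bStepJ rel i t j)).1[j.toNat]? = some true := hmJ2.1.2 j.toNat hafter
  have hinnerlen : ((PySem.List.pyRange (j+1) N).foldl (bStepJ rel i)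
      (bStepJ rel i t j)).1.length = N.toNat := by rw [hmJ2.1.1, hsteplen]
  obtain ⟨hmI2, -⟩ := foldI_props rel N (PySem.List.pyRange (i+1) N)
    (fun x hx => by rw [PySem.List.mem_pyRange_one] at hx; omega) _ hinnerlen
  exact hmI2.1.2 j.toNat hinner

lemma bLoop_spec (rel : List (List Int)) (N : Int) :
    ∀ fuel (r : List Bool), r.length = N.toNat → GoodB rel N r →
      N.toNat + 1 ≤ r.count true + fuel →
      ((bLoop rel N fuel r).length = N.toNat ∧ GoodB rel N (bLoop rel N fuel r) ∧
        PLe r (bLoop rel N fuel r) ∧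
        bRound rel N (bLoop rel N fuel r) = (bLoop rel N fuel r, false)) := by
  intro fuel
  induction fuel with
  | zero =>
    intro r hlen hgood hcount
    have := List.count_le_length (a := true) (l := r)
    omega
  | succ fuel ih =>
    intro r hlen hgood hcount
    obtain ⟨hm, hg⟩ := bRound_props rel N r hlen
    have hstep : bLoop rel N (fuel+1) r =
        if (bRound rel N r).2 then bLoop rel N fuel (bRound rel N r).1
        else (bRound rel N r).1 := rfl
    rw [hstep]
    by_cases hc : (bRound rel N r).2 = true
    · rw [if_pos hc]
      have hlt : r.count true < (bRound rel N r).1.count true := by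
        rcases hm.2.2.2 hc with h | h
        · simp at h
        · exact h
      obtain ⟨l1, l2, l3, l4⟩ := ih (bRound rel N r).1 (by rw [hm.1.1, hlen]) (hg hgood)
        (by omega)
      exact ⟨l1, l2, PLe_trans hm.1 l3, l4⟩
    · rw [if_neg hc]
      have hre : bRound rel N r = (r, false) := hm.2.1 (by simpa using hc)
      rw [hre]
      exact ⟨hlen, hgood, PLe_refl r, by rw [hre]⟩

lemma B_iff (rel : List (List Int)) (N : Int)
    (hpre : Pre_is_comparability_connected rel N) :
    is_comparability_connected_alt rel N = true ↔
      ∀ x : Int, 0 ≤ x → x < N → Reach rel N x := by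
  obtain ⟨h1, -, -⟩ := hpre
  set r0 := (List.replicate N.toNat false).set 0 true with hr0
  have hlen0 : r0.length = N.toNat := by simp [hr0]
  have hr00 : r0[0]? = some true := List.getElem?_set_self (by simp; omega)
  have hgood0 : GoodB rel N r0 := by
    intro k hk
    by_cases hk0 : k = 0
    · subst hk0
      exact Relation.ReflTransGen.refl
    · rw [hr0, List.getElem?_set, if_neg (fun h => hk0 h.symm)] at hk
      rcases h : (List.replicate N.toNat false)[k]? with _ | b
      · rw [h] at hk; simp at hk
      · rw [h] at hk
        have hb := List.mem_of_getElem? h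
        simp only [List.mem_replicate] at hb
        rw [hb.2] at hk
        simp at hk
  obtain ⟨hlenF, hgoodF, hpleF, hfixF⟩ :=
    bLoop_spec rel N (N.toNat + 1) r0 hlen0 hgood0 (by omega)
  set R := bLoop rel N (N.toNat + 1) r0 with hR
  have hcomp : ∀ x : Int, Reach rel N x → R[x.toNat]? = some true := by
    intro x hx
    induction hx with
    | refl => exact hpleF.2 0 hr00
    | @tail b c hbc e ih =>
      have hprog := bRound_progress rel N R hlenF b c e.1 e.2.1 e.2.2.1 e.2.2.2.1 ih
        (by rw [bEdge_eq_aEdge]; exact e.2.2.2.2)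
      rw [hfixF] at hprog
      exact hprog
  show (R.all (fun b => b)) = true ↔ _
  rw [List.all_eq_true]
  constructor
  · intro hall x hx0 hxN
    have hxlt : x.toNat < R.length := by omega
    have hmem : R[x.toNat] ∈ R := List.getElem_mem hxlt
    have hkx : R[x.toNat]? = some true := by
      rw [List.getElem?_eq_getElem hxlt, hall _ hmem]
    have := hgoodF x.toNat hkx
    rwa [Int.toNat_of_nonneg hx0] at this
  · intro hallR b hb
    obtain ⟨k, hklt, hkb⟩ := List.getElem_of_mem hb
    have hreach : Reach rel N (k : Int) := hallR k (by omega) (by omega)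
    have := hcomp (k : Int) hreach
    rw [Int.toNat_natCast] at this
    rw [List.getElem?_eq_getElem hklt] at this
    rw [← hkb]
    exact (Option.some.injEq ..).mp this

theorem is_comparability_connected_spec : Claim_equal_is_comparability_connected := by
  intro rel N hdom hpre
  unfold Spec_is_comparability_connected
  rw [Bool.eq_iff_iff, A_iff rel N hpre, B_iff rel N hpre]
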